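-- pv_equiv track=rewrite | github.com/HeyManLean/algo-learn | data_structure/leetcode/slider_window/ones_subarray.py | ones_subarray
-- ===== SOURCE A (Python) =====
-- def ones_subarray(A: list, K: int):
--     """Longest Subarray with Ones after Replacement
--
--     ```js
--     1004. 最大连续1的个数 III
--     给定一个由若干 0 和 1 组成的数组 A，我们最多可以将 K 个值从 0 变成 1 。
--
--     返回仅包含 1 的最长（连续）子数组的长度。
--
--
--
--     示例 1：
--
--     输入：A = [1,1,1,0,0,0,1,1,1,1,0], K = 2
--     输出：6
--     解释：
--     [1,1,1,0,0,1,1,1,1,1,1]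
--     粗体数字从 0 翻转到 1，最长的子数组长度为 6。
--     示例 2：
--
--     输入：A = [0,0,1,1,0,0,1,1,1,0,1,1,0,0,0,1,1,1,1], K = 3
--     输出：10
--     解释：
--     [0,0,1,1,1,1,1,1,1,1,1,1,0,0,0,1,1,1,1]
--     粗体数字从 0 翻转到 1，最长的子数组长度为 10。
--
--     链接: https://leetcode-cn.com/problems/max-consecutive-ones-iii/?utm_source=LCUS&utm_medium=ip_redirect_q_uns&utm_campaign=transfer2china
--     ```
--     """
--     n = len(A)
--     left = zero_cnt = res = 0
--
--     for i in range(n):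
--         num = A[i]
--
--         if num == 0:
--             zero_cnt += 1
--
--         while zero_cnt > K:
--             left_num = A[left]
--             if left_num == 0:
--                 zero_cnt -= 1
--
--             left += 1
--
--         res = max(res, i - left + 1)
--
--     return res
-- ===== SOURCE B (Python) =====
-- def ones_subarray(A: list, K: int):
--     """Non-shrinking sliding window: the window [left, i] never gets
--     smaller; its final width len(A) - left is the answer."""
--     left = 0
--     budget = K
--     for num in A:
--         if num == 0:
--             budget -= 1
--         if budget < 0:
--             if A[left] == 0:
--                 budget += 1
--             left += 1
--     return len(A) - left
-- ===== Notes on version B (the rewrite author's own statement) =====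
-- stated objective: faster
-- what changed: Replaces A's shrink-until-valid inner while loop and running max with the non-shrinking sliding window: one pass, at most one left-advance and no max update per element; the answer is len(A) - left at the end.
import Mathlib
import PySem

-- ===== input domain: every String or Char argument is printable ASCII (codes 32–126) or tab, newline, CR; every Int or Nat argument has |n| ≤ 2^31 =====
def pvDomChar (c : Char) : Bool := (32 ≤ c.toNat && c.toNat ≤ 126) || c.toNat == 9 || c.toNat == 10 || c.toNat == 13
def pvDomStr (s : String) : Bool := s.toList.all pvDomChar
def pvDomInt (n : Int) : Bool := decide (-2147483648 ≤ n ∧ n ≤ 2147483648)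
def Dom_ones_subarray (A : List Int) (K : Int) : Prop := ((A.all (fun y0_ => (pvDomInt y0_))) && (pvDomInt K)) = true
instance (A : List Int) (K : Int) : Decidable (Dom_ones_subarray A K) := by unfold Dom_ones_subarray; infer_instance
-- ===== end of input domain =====

-- B replaces A's shrink-until-valid inner while loop by the non-shrinking sliding window
-- (one left-advance per element, no running max; answer = len(A) - left): idiomatic one-pass form.
-- ===== PORT A =====
-- the inner `while zero_cnt > K:` loop of A; fuel bounds the recursion, pyGet? none = Python's IndexError
-- (then we stop and return the current state; those inputs are outside Pre_ones_subarray)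
def onesWhile (A : List Int) (K : Int) : Nat → Int → Int → Int × Int
  | 0, left, zc => (left, zc)
  | fuel+1, left, zc =>
    if K < zc then
      match PySem.List.pyGet? A left with
      | some v => onesWhile A K fuel (left + 1) (if v = 0 then zc - 1 else zc)
      | none => (left, zc)
    else (left, zc)

-- one iteration of A's `for i in range(n)` body; state = (left, zero_cnt, res)
def stepA (A : List Int) (K : Int) (st : Int × Int × Int) (i : Nat) : Int × Int × Int :=
  let num := A.getD i 0            -- A[i]; i ∈ range(len(A)) is always in range
  let zc := if num = 0 then st.2.1 + 1 else st.2.1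
  let p := onesWhile A K (A.length + 1) st.1 zc
  (p.1, p.2, max st.2.2 ((i : Int) - p.1 + 1))

def ones_subarray (A : List Int) (K : Int) : Int :=
  ((List.range A.length).foldl (stepA A K) (0, 0, 0)).2.2

-- ===== PORT B =====
-- one iteration of B's `for num in A` body; state = (left, budget)
def stepB (A : List Int) (st : Int × Int) (num : Int) : Int × Int :=
  let budget := if num = 0 then st.2 - 1 else st.2
  if budget < 0 then
    (st.1 + 1, if PySem.List.pyGetD A st.1 0 = 0 then budget + 1 else budget)
  else (st.1, budget)

def ones_subarray_alt (A : List Int) (K : Int) : Int :=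
  (A.length : Int) - (A.foldl (stepB A) (0, K)).1

-- ===== PRECONDITION & SPEC =====
-- Pre_ excludes exactly the inputs on which A raises IndexError: K < 0 with non-empty A
-- (the inner while loop then never ends normally and walks left off the end of the list).
def Pre_ones_subarray (A : List Int) (K : Int) : Prop := 0 ≤ K ∨ A = []
instance (A : List Int) (K : Int) : Decidable (Pre_ones_subarray A K) := by unfold Pre_ones_subarray; infer_instance
def pvWitness_ones_subarray : List Int × Int := ([1, 0, 1, 1, 0], 1)

def Spec_ones_subarray (A : List Int) (K : Int) (out : Int) : Prop := out = ones_subarray_alt A K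
instance (A : List Int) (K : Int) (out : Int) : Decidable (Spec_ones_subarray A K out) := by unfold Spec_ones_subarray; infer_instance

-- ===== CLAIM (what is proved, stated in full; the proofs are below) =====
def Claim_equal_ones_subarray : Prop := ∀ (A : List Int) (K : Int), Dom_ones_subarray A K → Pre_ones_subarray A K → Spec_ones_subarray A K (ones_subarray A K)

-- ===== LEMMAS AND PROOFS =====

-- Z A a j = number of zeros among A[a], …, A[j-1]
def Z (A : List Int) (a j : Nat) : Nat := ((A.take j).drop a).count 0

theorem Z_stop (A : List Int) (a j : Nat) (h : j ≤ a) : Z A a j = 0 := by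
  unfold Z
  rw [List.drop_eq_nil_of_le (by simpa using le_trans (Nat.min_le_left _ _) h)]
  rfl

theorem Z_succ (A : List Int) (a j : Nat) (ha : a ≤ j) (hj : j < A.length) :
    Z A a (j + 1) = Z A a j + (if A.getD j 0 = 0 then 1 else 0) := by
  unfold Z
  rw [List.take_add_one, List.getElem?_eq_getElem hj]
  rw [List.drop_append_of_le_length (by simp; omega)]
  rw [List.count_append, List.getD_eq_getElem A 0 hj]
  split_ifs with h <;> simp [h]

theorem Z_cons (A : List Int) (a j : Nat) (ha : a < j) (hal : a < A.length) :
    Z A a j = (if A.getD a 0 = 0 then 1 else 0) + Z A (a + 1) j := by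
  unfold Z
  have hlt : a < (A.take j).length := by simpa using ⟨ha, hal⟩
  rw [List.drop_eq_getElem_cons hlt, List.count_cons, List.getElem_take, List.getD_eq_getElem A 0 hal]
  split_ifs <;> simp_all [Nat.add_comm]

theorem onesWhile_stop (A : List Int) (K : Int) (fuel : Nat) (left zc : Int) (h : ¬ K < zc) :
    onesWhile A K (fuel + 1) left zc = (left, zc) := by
  simp [onesWhile, h]

-- A's inner while loop, run from a real window: ends at the minimal valid left pointer
theorem onesWhile_run (A : List Int) (K : Int) (hK : 0 ≤ K) :
    ∀ (fuel left m : Nat), left ≤ m → m ≤ A.length → (K : Int) < (Z A left m : Int) → m - left < fuel →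
    ∃ l' : Nat, left ≤ l' ∧ l' ≤ m ∧
      onesWhile A K fuel (left : Int) ((Z A left m : Nat) : Int) = ((l' : Int), ((Z A l' m : Nat) : Int)) ∧
      ((Z A l' m : Nat) : Int) ≤ K ∧
      (∀ l : Nat, left ≤ l → l < l' → (K : Int) < (Z A l m : Int)) := by
  intro fuel
  induction fuel with
  | zero => intro left m h1 h2 h3 h4; omega
  | succ fuel ih =>
    intro left m h1 h2 h3 h4
    -- the window has a zero, so left < m and A[left] exists
    have hlm : left < m := by
      rcases Nat.lt_or_ge left m with h | h
      · exact h
      · exfalso; rw [Z_stop A left m h] at h3; simp at h3; omega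
    have hll : left < A.length := lt_of_lt_of_le hlm h2
    have hget : PySem.List.pyGet? A (left : Int) = some (A.getD left 0) := by
      rw [PySem.List.pyGet?_natCast, List.getElem?_eq_getElem hll, List.getD_eq_getElem A 0 hll]
    have hZc := Z_cons A left m hlm hll
    by_cases hz : A.getD left 0 = 0
    · -- a zero leaves the window
      have hZ : Z A left m = Z A (left + 1) m + 1 := by rw [hZc, if_pos hz]; omega
      by_cases hK' : (K : Int) < (Z A (left + 1) m : Int)
      · obtain ⟨l', hl1, hl2, hl3, hl4, hl5⟩ := ih (left + 1) m hlm h2 hK' (by omega)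
        refine ⟨l', by omega, hl2, ?_, hl4, ?_⟩
        · rw [onesWhile]; rw [if_pos h3, hget]
          simp only [hz, if_pos]
          have : ((Z A left m : Nat) : Int) - 1 = ((Z A (left + 1) m : Nat) : Int) := by
            rw [hZ]; push_cast; ring
          rw [this]
          exact_mod_cast hl3
        · intro l hl hl'
          rcases Nat.eq_or_lt_of_le hl with rfl | h
          · exact h3
          · exact hl5 l h hl'
      · refine ⟨left + 1, by omega, hlm, ?_, by omega, ?_⟩
        · rw [onesWhile]; rw [if_pos h3, hget]
          simp only [hz, if_pos]
          have hE : ((Z A left m : Nat) : Int) - 1 = ((Z A (left + 1) m : Nat) : Int) := by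
            rw [hZ]; push_cast; ring
          rw [hE]
          cases fuel with
          | zero => omega
          | succ f => rw [onesWhile_stop A K f _ _ hK']; simp
        · intro l hl hl'
          have : l = left := by omega
          subst this; exact h3
    · -- a one leaves the window; the zero count is unchanged
      have hZ : Z A left m = Z A (left + 1) m := by rw [hZc, if_neg hz]; omega
      have hK' : (K : Int) < (Z A (left + 1) m : Int) := by rw [← hZ]; exact h3
      obtain ⟨l', hl1, hl2, hl3, hl4, hl5⟩ := ih (left + 1) m hlm h2 hK' (by omega)
      refine ⟨l', by omega, hl2, ?_, hl4, ?_⟩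
      · rw [onesWhile]; rw [if_pos h3, hget]
        simp only [hz, if_neg, ite_false]
        rw [hZ]
        exact_mod_cast hl3
      · intro l hl hl'
        rcases Nat.eq_or_lt_of_le hl with rfl | h
        · exact h3
        · exact hl5 l h hl'

-- the coupled loop invariant: after j iterations, A's running max equals B's window width j - lb,
-- A's left pointer la is the minimal valid left, and both zero counters describe their windows
theorem coupled_inv (A : List Int) (K : Int) (hK : 0 ≤ K) :
    ∀ j : Nat, j ≤ A.length →
    ∃ la lb : Nat, lb ≤ la ∧ la ≤ j ∧
      ((List.range j).foldl (stepA A K) (0, 0, 0)) = ((la : Int), ((Z A la j : Nat) : Int), (j : Int) - (lb : Int)) ∧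
      ((A.take j).foldl (stepB A) ((0 : Int), K)) = ((lb : Int), K - ((Z A lb j : Nat) : Int)) ∧
      ((Z A la j : Nat) : Int) ≤ K ∧
      (∀ l : Nat, l < la → (K : Int) < (Z A l j : Int)) := by
  intro j
  induction j with
  | zero =>
    intro _
    exact ⟨0, 0, le_refl 0, le_refl 0, by simp [Z_stop], by simp [Z_stop], by simp [Z_stop]; omega, by omega⟩
  | succ j ih =>
    intro hj
    have hjl : j < A.length := by omega
    obtain ⟨la, lb, hba, haj, hA, hB, hle, hmin⟩ := ih (by omega)
    -- unfold one step of each fold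
    have hrange : (List.range (j + 1)).foldl (stepA A K) (0, 0, 0) =
        stepA A K ((List.range j).foldl (stepA A K) (0, 0, 0)) j := by
      rw [List.range_succ, List.foldl_append]; rfl
    have htake : (A.take (j + 1)).foldl (stepB A) ((0 : Int), K) =
        stepB A ((A.take j).foldl (stepB A) ((0 : Int), K)) (A.getD j 0) := by
      rw [List.take_add_one, List.getElem?_eq_getElem hjl, List.getD_eq_getElem A 0 hjl]
      rw [List.foldl_append]; rfl
    set x := A.getD j 0 with hx
    have hZa : Z A la (j + 1) = Z A la j + (if x = 0 then 1 else 0) := Z_succ A la j haj hjl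
    have hZb : Z A lb (j + 1) = Z A lb j + (if x = 0 then 1 else 0) := Z_succ A lb j (by omega) hjl
    have hmin' : ∀ l : Nat, l < la → (K : Int) < (Z A l (j + 1) : Int) := by
      intro l hl
      have := hmin l hl
      have := Z_succ A l j (by omega) hjl
      split_ifs at this <;> omega
    -- A's step: the new zero count before the while loop is Z la (j+1)
    have hzc1 : (if x = 0 then ((Z A la j : Nat) : Int) + 1 else ((Z A la j : Nat) : Int)) =
        ((Z A la (j + 1) : Nat) : Int) := by rw [hZa]; split_ifs <;> push_cast <;> ring
    by_cases hcase : (K : Int) < (Z A la (j + 1) : Int)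
    · -- A shrinks via the while loop
      obtain ⟨la', h1, h2, h3, h4, h5⟩ :=
        onesWhile_run A K hK (A.length + 1) la (j + 1) (by omega) (by omega) hcase (by omega)
      have hminN : ∀ l : Nat, l < la' → (K : Int) < (Z A l (j + 1) : Int) := by
        intro l hl
        rcases Nat.lt_or_ge l la with h | h
        · exact hmin' l h
        · exact h5 l h hl
      have hAstep : (List.range (j + 1)).foldl (stepA A K) (0, 0, 0) =
          ((la' : Int), ((Z A la' (j + 1) : Nat) : Int),
            max ((j : Int) - (lb : Int)) ((j : Int) - (la' : Int) + 1)) := by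
        rw [hrange, hA]; unfold stepA
        simp only [← hx, hzc1, h3]
      by_cases hb : (K : Int) < (Z A lb (j + 1) : Int)
      · -- B also shifts left by one
        have hlb' : lb < la' := by
          rcases Nat.eq_or_lt_of_le (le_trans hba h1) with rfl | h
          · exact absurd hb (by omega)
          · exact h
        have hbl : lb < A.length := by omega
        have hZbc : Z A lb (j + 1) = (if A.getD lb 0 = 0 then 1 else 0) + Z A (lb + 1) (j + 1) :=
          Z_cons A lb (j + 1) (by omega) hbl
        refine ⟨la', lb + 1, by omega, by omega, ?_, ?_, h4, hminN⟩
        · rw [hAstep]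
          have : max ((j : Int) - (lb : Int)) ((j : Int) - (la' : Int) + 1) = (j : Int) - (lb : Int) := by
            apply max_eq_left; omega
          rw [this]; push_cast; ring_nf
        · rw [htake, hB]; unfold stepB
          have hbdg : (if x = 0 then K - ((Z A lb j : Nat) : Int) - 1 else K - ((Z A lb j : Nat) : Int)) =
              K - ((Z A lb (j + 1) : Nat) : Int) := by rw [hZb]; split_ifs <;> push_cast <;> ring
          rw [hbdg, if_pos (by omega)]
          rw [PySem.List.pyGetD_natCast]
          have : (if A.getD lb 0 = 0 then K - ((Z A lb (j + 1) : Nat) : Int) + 1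
                  else K - ((Z A lb (j + 1) : Nat) : Int)) = K - ((Z A (lb + 1) (j + 1) : Nat) : Int) := by
            split_ifs with h0
            · rw [if_pos h0] at hZbc; omega
            · rw [if_neg h0] at hZbc; omega
          rw [this]; push_cast; ring_nf
      · -- B's window is valid: lb must equal la'
        have hlb' : lb = la' := by
          rcases Nat.eq_or_lt_of_le (le_trans hba h1) with h | h
          · exact h
          · exact absurd (hminN lb h) (by omega)
        rw [← hlb'] at hAstep h2 h4 hminN
        refine ⟨lb, lb, le_refl _, h2, ?_, ?_, h4, hminN⟩
        · rw [hAstep]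
          have : max ((j : Int) - (lb : Int)) ((j : Int) - (lb : Int) + 1) = (j : Int) - (lb : Int) + 1 := by
            apply max_eq_right; omega
          rw [this]; push_cast; ring_nf
        · rw [htake, hB]; unfold stepB
          have hbdg : (if x = 0 then K - ((Z A lb j : Nat) : Int) - 1 else K - ((Z A lb j : Nat) : Int)) =
              K - ((Z A lb (j + 1) : Nat) : Int) := by rw [hZb]; split_ifs <;> push_cast <;> ring
          rw [hbdg, if_neg (by omega)]
    · -- A's window stays valid, no shrink
      have hAstep : (List.range (j + 1)).foldl (stepA A K) (0, 0, 0) =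
          ((la : Int), ((Z A la (j + 1) : Nat) : Int),
            max ((j : Int) - (lb : Int)) ((j : Int) - (la : Int) + 1)) := by
        rw [hrange, hA]; unfold stepA
        simp only [← hx, hzc1]
        rw [onesWhile_stop A K A.length _ _ hcase]
      by_cases hb : (K : Int) < (Z A lb (j + 1) : Int)
      · -- B shifts left by one; lb < la since la's window is valid
        have hlb' : lb < la := by
          rcases Nat.eq_or_lt_of_le hba with rfl | h
          · exact absurd hb (by omega)
          · exact h
        have hbl : lb < A.length := by omega
        have hZbc : Z A lb (j + 1) = (if A.getD lb 0 = 0 then 1 else 0) + Z A (lb + 1) (j + 1) :=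
          Z_cons A lb (j + 1) (by omega) hbl
        refine ⟨la, lb + 1, by omega, by omega, ?_, ?_, by omega, hmin'⟩
        · rw [hAstep]
          have : max ((j : Int) - (lb : Int)) ((j : Int) - (la : Int) + 1) = (j : Int) - (lb : Int) := by
            apply max_eq_left; omega
          rw [this]; push_cast; ring_nf
        · rw [htake, hB]; unfold stepB
          have hbdg : (if x = 0 then K - ((Z A lb j : Nat) : Int) - 1 else K - ((Z A lb j : Nat) : Int)) =
              K - ((Z A lb (j + 1) : Nat) : Int) := by rw [hZb]; split_ifs <;> push_cast <;> ring
          rw [hbdg, if_pos (by omega)]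
          rw [PySem.List.pyGetD_natCast]
          have : (if A.getD lb 0 = 0 then K - ((Z A lb (j + 1) : Nat) : Int) + 1
                  else K - ((Z A lb (j + 1) : Nat) : Int)) = K - ((Z A (lb + 1) (j + 1) : Nat) : Int) := by
            split_ifs with h0
            · rw [if_pos h0] at hZbc; omega
            · rw [if_neg h0] at hZbc; omega
          rw [this]; push_cast; ring_nf
      · -- neither moves: lb = la
        have hlb' : lb = la := by
          rcases Nat.eq_or_lt_of_le hba with h | h
          · exact h
          · exact absurd (hmin' lb h) (by omega)
        rw [← hlb'] at hAstep hle hmin' hZa hzc1 hcase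
        refine ⟨lb, lb, le_refl _, by omega, ?_, ?_, by omega, hmin'⟩
        · rw [hAstep]
          have : max ((j : Int) - (lb : Int)) ((j : Int) - (lb : Int) + 1) = (j : Int) - (lb : Int) + 1 := by
            apply max_eq_right; omega
          rw [this]; push_cast; ring_nf
        · rw [htake, hB]; unfold stepB
          have hbdg : (if x = 0 then K - ((Z A lb j : Nat) : Int) - 1 else K - ((Z A lb j : Nat) : Int)) =
              K - ((Z A lb (j + 1) : Nat) : Int) := by rw [hZb]; split_ifs <;> push_cast <;> ring
          rw [hbdg, if_neg (by omega)]

-- ===== VERDICT (by name: the statement is the Claim_ definition above) =====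
theorem ones_subarray_spec : Claim_equal_ones_subarray := by
  intro A K _ hPre
  unfold Spec_ones_subarray
  rcases hPre with hK | rfl
  · obtain ⟨la, lb, _, _, hA, hB, _, _⟩ := coupled_inv A K hK A.length (le_refl _)
    rw [List.take_length] at hB
    unfold ones_subarray ones_subarray_alt
    rw [hA, hB]
  · rfl
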